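-- pv_equiv track=rewrite | github.com/meezan-in/Compiler-LLVM | LLVMProj/webapp/ir_diff_tool.py | _align_lines
-- ===== SOURCE A (Python) =====
-- from typing import List, Dict, Tuple, Optional
--
-- def _align_lines(before: List[str], after: List[str]) -> List[str]:
--     """Align before and after lines for side-by-side view."""
--     output = []
--     max_before = max(len(line) for line in before) if before else 0
--     max_after = max(len(line) for line in after) if after else 0
--
--     for b, a in zip(before, after):
--         output.append(f"{b.rstrip():<{max_before}} | {a.rstrip()}")
--
--     # Handle remaining lines
--     if len(before) > len(after):
--         for b in before[len(after):]:
--             output.append(f"{b.rstrip():<{max_before}} |")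
--     elif len(after) > len(before):
--         for a in after[len(before):]:
--             output.append(f"{'':<{max_before}} | {a.rstrip()}")
--
--     return output
-- ===== SOURCE B (Python) =====
-- def _align_lines(before, after):
--     """Align before and after lines for side-by-side view."""
--     n = max(len(before), len(after))
--     width = max((len(b) for b in before), default=0)
--     # staged construction: build each full-height column, then join row-wise
--     left = [b.rstrip().ljust(width) for b in before] + [" " * width] * (n - len(before))
--     right = [" " + a.rstrip() for a in after] + [""] * (n - len(after))
--     return [l + " |" + r for l, r in zip(left, right)]
-- ===== Notes on version B (the rewrite author's own statement) =====
-- stated objective: alternative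
-- what changed: Column-wise staged construction: instead of A's row-wise zip loop plus two conditional tail loops, B first builds the complete padded left column and the complete right column (each extended to full height), then joins the two columns row by row with a fixed ' |' separator and no branching.
import Mathlib
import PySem

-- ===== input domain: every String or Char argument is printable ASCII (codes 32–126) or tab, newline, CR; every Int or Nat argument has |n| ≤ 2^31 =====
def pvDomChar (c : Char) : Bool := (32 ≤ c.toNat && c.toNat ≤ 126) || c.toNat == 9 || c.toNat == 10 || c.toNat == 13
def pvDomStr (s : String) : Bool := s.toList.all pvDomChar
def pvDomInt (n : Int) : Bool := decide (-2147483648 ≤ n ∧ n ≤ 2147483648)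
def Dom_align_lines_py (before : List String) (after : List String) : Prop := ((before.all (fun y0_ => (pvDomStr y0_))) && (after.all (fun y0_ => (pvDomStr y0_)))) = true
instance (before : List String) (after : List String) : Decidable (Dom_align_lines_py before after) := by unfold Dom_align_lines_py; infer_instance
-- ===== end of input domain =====

-- B builds the two full-height columns first (padded left column, prefixed right column)
-- and then joins them row by row, instead of A's row-wise zip loop plus two tail loops (objective: alternative).

-- formatting primitive: f"{s:<{w}}" / s.ljust(w) — left-justify with spaces to width w
def pyLJust (s : String) (w : Int) : String :=
  s ++ String.ofList (List.replicate (w - PySem.Str.len s).toNat ' ')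

-- " " * w — exact for w ≥ 0 (the only way B calls it: w is a max of lengths)
def pySpaces (w : Int) : String :=
  String.ofList (List.replicate w.toNat ' ')

-- ===== PORT A =====
def align_lines_py (before : List String) (after : List String) : List String :=
  let output : List String := []
  let max_before : Int :=
    match before with
    | [] => 0
    | x :: xs => xs.foldl (fun m s => max m (PySem.Str.len s)) (PySem.Str.len x)
  let _max_after : Int :=   -- computed by A but never used
    match after with
    | [] => 0
    | x :: xs => xs.foldl (fun m s => max m (PySem.Str.len s)) (PySem.Str.len x)
  let output := (before.zip after).foldl
    (fun acc ba =>
      acc ++ [pyLJust (PySem.Str.rstrip ba.1) max_before ++ " | " ++ PySem.Str.rstrip ba.2]) output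
  let output :=
    if before.length > after.length then
      (PySem.List.slice before (some (PySem.List.len after)) none).foldl
        (fun acc b => acc ++ [pyLJust (PySem.Str.rstrip b) max_before ++ " |"]) output
    else if after.length > before.length then
      (PySem.List.slice after (some (PySem.List.len before)) none).foldl
        (fun acc a => acc ++ [pyLJust "" max_before ++ " | " ++ PySem.Str.rstrip a]) output
    else output
  output

-- ===== PORT B =====
def align_lines_py_alt (before : List String) (after : List String) : List String :=
  let n := max before.length after.length
  let width : Int := before.foldl (fun m s => max m (PySem.Str.len s)) 0
  let left := before.map (fun b => pyLJust (PySem.Str.rstrip b) width) ++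
              List.replicate (n - before.length) (pySpaces width)
  let right := after.map (fun a => " " ++ PySem.Str.rstrip a) ++
               List.replicate (n - after.length) ""
  (left.zip right).map (fun lr => lr.1 ++ " |" ++ lr.2)

-- ===== PRECONDITION & SPEC =====
def Spec_align_lines_py (before : List String) (after : List String) (out : List String) : Prop := out = align_lines_py_alt before after
instance (before : List String) (after : List String) (out : List String) : Decidable (Spec_align_lines_py before after out) := by unfold Spec_align_lines_py; infer_instance

-- ===== CLAIM (what is proved, stated in full; the proofs are below) =====
def Claim_equal_align_lines_py : Prop := ∀ (before : List String) (after : List String), Dom_align_lines_py before after → Spec_align_lines_py before after (align_lines_py before after)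

-- ===== LEMMAS AND PROOFS =====

-- joining "p | x" from the two column pieces "p" and " x"
theorem sep_join (p x : String) : p ++ " |" ++ (" " ++ x) = p ++ " | " ++ x := by
  rw [String.append_assoc, String.append_assoc]
  congr 1

theorem spaces_eq_ljust_empty (w : Int) : pySpaces w = pyLJust "" w := by
  simp [pySpaces, pyLJust, PySem.Str.len, String.empty_append]

-- B's max-from-0 fold is A's inlined max expression
theorem width_eq (xs : List String) :
    xs.foldl (fun m s => max m (PySem.Str.len s)) 0 =
      (match xs with
       | [] => (0 : Int)
       | x :: xs' => xs'.foldl (fun m s => max m (PySem.Str.len s)) (PySem.Str.len x)) := by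
  cases xs with
  | nil => rfl
  | cons x xs' =>
    have h0 : max (0 : Int) (PySem.Str.len x) = PySem.Str.len x := by
      apply max_eq_right
      simp [PySem.Str.len_eq]
    simp only [List.foldl, h0]

-- the after-only block of rows
theorem join_pad_left (w : Int) :
    ∀ (as : List String),
      ((List.replicate as.length (pySpaces w)).zip
        (as.map (fun a => " " ++ PySem.Str.rstrip a))).map (fun lr => lr.1 ++ " |" ++ lr.2) =
      as.map (fun a => pyLJust "" w ++ " | " ++ PySem.Str.rstrip a)
  | [] => by simp
  | a :: as => by
    simp only [List.length_cons, List.replicate_succ, List.map_cons, List.zip_cons_cons]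
    rw [join_pad_left w as]
    congr 1
    rw [sep_join, spaces_eq_ljust_empty]

-- the before-only block of rows
theorem join_pad_right (w : Int) :
    ∀ (bs : List String),
      ((bs.map (fun b => pyLJust (PySem.Str.rstrip b) w)).zip
        (List.replicate bs.length "")).map (fun lr => lr.1 ++ " |" ++ lr.2) =
      bs.map (fun b => pyLJust (PySem.Str.rstrip b) w ++ " |")
  | [] => by simp
  | b :: bs => by
    simp only [List.length_cons, List.replicate_succ, List.map_cons, List.zip_cons_cons]
    rw [join_pad_right w bs]
    congr 1
    exact String.append_empty

-- column construction + row join equals A's zip part followed by its tail part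
theorem colJoin (w : Int) :
    ∀ (before after : List String),
      ((before.map (fun b => pyLJust (PySem.Str.rstrip b) w) ++
          List.replicate (max before.length after.length - before.length) (pySpaces w)).zip
        (after.map (fun a => " " ++ PySem.Str.rstrip a) ++
          List.replicate (max before.length after.length - after.length) "")).map
        (fun lr => lr.1 ++ " |" ++ lr.2) =
      (before.zip after).map
        (fun ba => pyLJust (PySem.Str.rstrip ba.1) w ++ " | " ++ PySem.Str.rstrip ba.2) ++
      (if after.length < before.length then
        (before.drop after.length).map (fun b => pyLJust (PySem.Str.rstrip b) w ++ " |")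
      else
        (after.drop before.length).map (fun a => pyLJust "" w ++ " | " ++ PySem.Str.rstrip a))
  | [], after => by
    rw [if_neg (show ¬ after.length < List.length ([] : List String) by simp)]
    simp only [List.map_nil, List.nil_append, List.length_nil, Nat.zero_max, Nat.sub_zero,
      List.zip_nil_left, List.drop_zero, List.append_nil, Nat.sub_self, List.replicate_zero]
    exact join_pad_left w after
  | b :: bs, [] => by
    rw [if_pos (show List.length ([] : List String) < (b :: bs).length by simp)]
    simp only [List.map_nil, List.nil_append, List.length_nil, Nat.max_zero, Nat.sub_zero,
      List.zip_nil_right, List.drop_zero, Nat.sub_self, List.replicate_zero, List.append_nil]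
    exact join_pad_right w (b :: bs)
  | b :: bs, a :: as => by
    have ih := colJoin w bs as
    have h1 : max (b :: bs).length (a :: as).length - (b :: bs).length =
        max bs.length as.length - bs.length := by simp only [List.length_cons]; omega
    have h2 : max (b :: bs).length (a :: as).length - (a :: as).length =
        max bs.length as.length - as.length := by simp only [List.length_cons]; omega
    rw [h1, h2]
    simp only [List.map_cons, List.cons_append, List.zip_cons_cons]
    rw [ih]
    have hif : ((a :: as).length < (b :: bs).length) = (as.length < bs.length) := by simp
    have hd1 : List.drop (a :: as).length (b :: bs) = List.drop as.length bs := by simp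
    have hd2 : List.drop (b :: bs).length (a :: as) = List.drop bs.length as := by simp
    simp only [hif, hd1, hd2]
    congr 1
    exact sep_join _ _

-- ===== VERDICT (by name: the statement is the Claim_ definition above) =====
theorem align_lines_py_spec : Claim_equal_align_lines_py := by
  intro before after _
  show align_lines_py before after = align_lines_py_alt before after
  unfold align_lines_py align_lines_py_alt
  rw [width_eq before]
  simp only [PySem.List.foldl_append_singleton_eq_map, List.nil_append, PySem.List.len_eq,
    PySem.List.slice_from_natCast]
  rw [colJoin]
  rcases Nat.lt_trichotomy after.length before.length with h | h | h
  · rw [if_pos h, if_pos h]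
  · rw [if_neg (by omega), if_neg (by omega), if_neg (by omega), ← h, List.drop_length,
      List.map_nil, List.append_nil]
  · rw [if_neg (by omega), if_pos h, if_neg (by omega)]
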